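-- pv_equiv track=rewrite | github.com/SamPUG/advent_of_code_2024 | day7.py | calculate_input
-- ===== SOURCE A (Python) =====
-- def calculate_input(input_str: str) -> int:
--     total = 0
--
--     val = ""
--     operator = ""
--     for i in range(len(input_str) + 1):
--         char = "+"  # To make sure we deal with the last val, operator doesn't matter, just want to trigger the operator behaviour
--         if i < len(input_str):
--             char = input_str[i]
--
--         if char not in ["+", "*", "|"]:
--             val += char
--         else:
--             int_val = int(val)
--             if operator == "+":
--                 total += int_val
--             elif operator == "*":
--                 total *= int_val
--             elif operator == "|":
--                 total = int(str(total) + val)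
--             else:
--                 operator = char
--                 total += int_val
--             operator = char
--             val = ""
--
--     return total
-- ===== SOURCE B (Python) =====
-- def calculate_input(input_str: str) -> int:
--     # Pass 1: tokenize into alternating operand strings and one-char operators.
--     tokens = []
--     cur = ""
--     for ch in input_str:
--         if ch in "+*|":
--             tokens.append(cur)
--             tokens.append(ch)
--             cur = ""
--         else:
--             cur += ch
--     tokens.append(cur)
--
--     # Pass 2: fold left-to-right, consuming (operator, operand) pairs.
--     total = int(tokens[0])
--     rest = tokens[1:]
--     while rest:
--         op, operand = rest[0], rest[1]
--         n = int(operand)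
--         if op == "+":
--             total += n
--         elif op == "*":
--             total *= n
--         else:  # '|': concatenate the raw operand text to preserve its digits
--             total = int(str(total) + operand)
--         rest = rest[2:]
--     return total
-- ===== Notes on version B (the rewrite author's own statement) =====
-- stated objective: idiomatic
-- what changed: B replaces A's single character-loop with mixed parser/evaluator state (pending val, operator, sentinel '+' appended past the end) by two clean passes: tokenize into an alternating operand/operator list, then fold over (operator, operand) pairs.
import Mathlib
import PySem

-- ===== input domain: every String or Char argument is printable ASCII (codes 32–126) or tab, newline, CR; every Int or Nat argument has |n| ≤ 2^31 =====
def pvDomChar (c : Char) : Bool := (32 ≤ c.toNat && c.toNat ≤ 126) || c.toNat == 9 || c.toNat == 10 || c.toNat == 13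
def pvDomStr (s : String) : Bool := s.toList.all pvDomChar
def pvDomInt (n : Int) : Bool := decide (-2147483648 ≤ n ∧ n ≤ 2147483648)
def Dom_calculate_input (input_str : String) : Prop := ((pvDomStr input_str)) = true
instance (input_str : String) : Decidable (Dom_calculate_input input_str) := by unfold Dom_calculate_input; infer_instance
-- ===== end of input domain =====

-- B replaces A's one mixed parse/evaluate character loop by two passes: tokenize, then fold over
-- (operator, operand) pairs. Same cost; the aim is a plainer decomposition.

-- ===== PORT A =====
-- state = (total, val, operator); the for-loop over range(len+1) with char='+' at i=len is the
-- fold over the characters with a final '+' appended.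
def pvAStep (st : Int × List Char × List Char) (char : Char) : Int × List Char × List Char :=
  match st with
  | (total, val, operator) =>
    if ¬(char = '+' ∨ char = '*' ∨ char = '|') then (total, val ++ [char], operator)
    else
      let int_val := (PySem.Int.ofChars? val).getD 0   -- int(val); none (ValueError) excluded by Pre_
      if operator = ['+'] then (total + int_val, [], [char])
      else if operator = ['*'] then (total * int_val, [], [char])
      else if operator = ['|'] then
        ((PySem.Int.ofChars? (PySem.Int.toChars total ++ val)).getD 0, [], [char])
      else (total + int_val, [], [char])

def calculate_input (input_str : String) : Int :=
  ((input_str.toList ++ ['+']).foldl pvAStep (0, [], [])).1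

-- ===== PORT B =====
-- pass 1: tokenize (state = (tokens, cur))
def pvTokStep (st : List (List Char) × List Char) (ch : Char) : List (List Char) × List Char :=
  if ch = '+' ∨ ch = '*' ∨ ch = '|' then (st.1 ++ [st.2, [ch]], []) else (st.1, st.2 ++ [ch])

-- pass 2: the while-loop consuming (op, operand) pairs; a lone trailing element is unreachable
-- (Python would raise IndexError there), the port returns the running total.
def pvEvalLoop (total : Int) : List (List Char) → Int
  | op :: operand :: rest =>
      let n := (PySem.Int.ofChars? operand).getD 0
      let total' :=
        if op = ['+'] then total + n
        else if op = ['*'] then total * n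
        else (PySem.Int.ofChars? (PySem.Int.toChars total ++ operand)).getD 0
      pvEvalLoop total' rest
  | _ => total

def calculate_input_alt (input_str : String) : Int :=
  let st := input_str.toList.foldl pvTokStep ([], [])
  match st.1 ++ [st.2] with
  | t :: rest => pvEvalLoop ((PySem.Int.ofChars? t).getD 0) rest
  | [] => 0   -- unreachable: tokenization always yields at least one token

-- ===== PRECONDITION & SPEC =====
-- helpers for Pre_ only: split the input on operator characters
def pvSegs : List Char → List (List Char)
  | [] => [[]]
  | c :: cs =>
    if c = '+' ∨ c = '*' ∨ c = '|' then [] :: pvSegs cs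
    else match pvSegs cs with
         | s :: ss => (c :: s) :: ss
         | [] => [[c]]

def pvOpsOf (cs : List Char) : List Char := cs.filter (fun c => c == '+' || c == '*' || c == '|')

-- Pre_ excludes exactly the inputs on which A raises ValueError: a segment between operator
-- characters that int() cannot parse, or a '|' whose right operand does not start with a digit
-- (then int(str(total) + val) fails on the sign/whitespace in the middle).
def Pre_calculate_input (input_str : String) : Prop :=
  ((pvSegs input_str.toList).all (fun seg => (PySem.Int.ofChars? seg).isSome)
    && ((pvOpsOf input_str.toList).zip (pvSegs input_str.toList).tail).all
         (fun p => !(p.1 == '|') || (match p.2 with | c :: _ => c.isDigit | [] => false))) = true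

instance (input_str : String) : Decidable (Pre_calculate_input input_str) := by
  unfold Pre_calculate_input; infer_instance

def pvWitness_calculate_input : String := "12+3*4|56"

def Spec_calculate_input (input_str : String) (out : Int) : Prop := out = calculate_input_alt input_str
instance (input_str : String) (out : Int) : Decidable (Spec_calculate_input input_str out) := by
  unfold Spec_calculate_input; infer_instance

-- ===== CLAIM (what is proved, stated in full; the proofs are below) =====
def Claim_equal_calculate_input : Prop := ∀ (input_str : String), Dom_calculate_input input_str → Pre_calculate_input input_str → Spec_calculate_input input_str (calculate_input input_str)

-- ===== LEMMAS AND PROOFS =====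
-- tokens produced by pass 1 of B starting from partial token cur
def pvToksFrom (cur : List Char) (cs : List Char) : List (List Char) :=
  let st := cs.foldl pvTokStep ([], cur)
  st.1 ++ [st.2]

theorem pvTok_acc (cs : List Char) (toks : List (List Char)) (cur : List Char) :
    cs.foldl pvTokStep (toks, cur)
      = (toks ++ (cs.foldl pvTokStep ([], cur)).1, (cs.foldl pvTokStep ([], cur)).2) := by
  induction cs generalizing toks cur with
  | nil => simp
  | cons c cs ih =>
    simp only [List.foldl_cons, pvTokStep]
    by_cases h : c = '+' ∨ c = '*' ∨ c = '|' <;> simp [h]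
    · rw [ih (toks ++ [cur, [c]]) [], ih [cur, [c]] []]; simp
    · exact ih toks (cur ++ [c])

theorem pvToksFrom_cons (cur : List Char) (c : Char) (cs : List Char) :
    pvToksFrom cur (c :: cs)
      = if c = '+' ∨ c = '*' ∨ c = '|' then cur :: [c] :: pvToksFrom [] cs
        else pvToksFrom (cur ++ [c]) cs := by
  unfold pvToksFrom
  by_cases h : c = '+' ∨ c = '*' ∨ c = '|'
  · simp only [List.foldl_cons, pvTokStep, h, if_pos]
    rw [pvTok_acc]; simp
  · simp only [List.foldl_cons, pvTokStep, h, if_neg, not_false_eq_true]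

-- the main invariant: continuing A's loop from state (total, cur, [op]) over cs (plus the
-- sentinel '+') computes exactly B's evaluation of op followed by the tokens of cur/cs.
theorem pvMain (cs : List Char) (cur : List Char) (total : Int) (op : Char)
    (hop : op = '+' ∨ op = '*' ∨ op = '|') :
    ((cs ++ ['+']).foldl pvAStep (total, cur, [op])).1
      = pvEvalLoop total ([op] :: pvToksFrom cur cs) := by
  induction cs generalizing cur total op with
  | nil =>
    rcases hop with h | h | h <;> subst h <;>
      simp [pvAStep, pvEvalLoop, pvToksFrom]
  | cons c cs ih =>
    rw [List.cons_append, List.foldl_cons, pvToksFrom_cons]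
    by_cases h : c = '+' ∨ c = '*' ∨ c = '|'
    · rw [if_pos h]
      rcases hop with h1 | h1 | h1 <;> subst h1 <;>
        simp only [pvAStep, h, not_true_eq_false, if_false, reduceIte, pvEvalLoop] <;>
        exact ih [] _ c h
    · rw [if_neg h]
      simp only [pvAStep, h, not_false_eq_true, if_pos]
      exact ih (cur ++ [c]) total op hop

-- the same for A's initial empty operator: its final else-branch adds like '+'
theorem pvInit (cs : List Char) (cur : List Char) (total : Int) :
    ((cs ++ ['+']).foldl pvAStep (total, cur, [])).1
      = pvEvalLoop total (['+'] :: pvToksFrom cur cs) := by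
  induction cs generalizing cur total with
  | nil => simp [pvAStep, pvEvalLoop, pvToksFrom]
  | cons c cs ih =>
    rw [List.cons_append, List.foldl_cons, pvToksFrom_cons]
    by_cases h : c = '+' ∨ c = '*' ∨ c = '|'
    · rw [if_pos h]
      simp only [pvAStep, h, not_true_eq_false, if_false, reduceIte, pvEvalLoop,
        show ¬(([] : List Char) = ['+']) by decide, show ¬(([] : List Char) = ['*']) by decide,
        show ¬(([] : List Char) = ['|']) by decide]
      exact pvMain cs [] _ c h
    · rw [if_neg h]
      simp only [pvAStep, h, not_false_eq_true, if_pos]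
      exact ih (cur ++ [c]) total

theorem pvToksFrom_ne_nil (cur : List Char) (cs : List Char) : pvToksFrom cur cs ≠ [] := by
  unfold pvToksFrom; simp

-- ===== VERDICT (by name: the statement is the Claim_ definition above) =====
theorem calculate_input_spec : Claim_equal_calculate_input := by
  intro s _ _
  unfold Spec_calculate_input calculate_input calculate_input_alt
  rw [pvInit s.toList [] 0]
  have h := pvToksFrom_ne_nil [] s.toList
  rcases hts : pvToksFrom [] s.toList with _ | ⟨t, rest⟩
  · exact absurd hts h
  · have : (s.toList.foldl pvTokStep ([], [])).1 ++ [(s.toList.foldl pvTokStep ([], [])).2]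
        = t :: rest := by
      rw [← hts]; rfl
    simp [this, pvEvalLoop]
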